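-- pv_equiv track=rewrite | github.com/pypi-data/pypi-mirror-401 | packages/itential-mcp/itential_mcp-0.11.1-py3-none-any.whl/itential_mcp/utilities/string.py | is_valid_url_path
-- ===== SOURCE A (Python) =====
-- def is_valid_url_path(path: str) -> bool:
--     """
--     Validate if a string is a valid URL path.
--
--     Args:
--         path (str): The string to validate as a URL path
--
--     Returns:
--         bool: True if the path is valid, False otherwise
--
--     Raises:
--         TypeError: If path is not a string
--     """
--     if not isinstance(path, str):
--         raise TypeError("Path must be a string")
--
--     # Empty string is valid (root path)
--     if not path:
--         return True
--
--     # Check for invalid characters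
--     invalid_chars = set(' <>"{}|\\^`')
--     if any(char in invalid_chars for char in path):
--         return False
--
--     # Check each path segment
--     segments = path.split("/")
--     for segment in segments[1:]:  # Skip first empty segment
--         # Segment can be empty (double slashes are technically valid)
--         if segment:
--             # Check for reserved characters that need encoding
--             if any(char in segment for char in ["?", "#"]):
--                 return False
--
--     return True
-- ===== SOURCE B (Python) =====
-- def is_valid_url_path(path: str) -> bool:
--     """Single-pass re-implementation: one walk over the characters with a
--     seen_slash flag, instead of a full invalid-char scan plus split("/")
--     and a second loop over the segments."""
--     if not isinstance(path, str):
--         raise TypeError("Path must be a string")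
--
--     invalid_chars = set(' <>"{}|\\^`')
--     seen_slash = False
--     for ch in path:
--         if ch in invalid_chars:
--             return False
--         if ch == "/":
--             seen_slash = True
--         elif seen_slash and (ch == "?" or ch == "#"):
--             return False
--     return True
-- ===== Notes on version B (the rewrite author's own statement) =====
-- stated objective: simpler
-- what changed: Replaces the two-phase check (whole-string invalid-char scan, then split('/') and a loop over segments[1:]) with a single pass over the characters that tracks a seen_slash flag and rejects '?'/'#' only after the first '/'.
import Mathlib
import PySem

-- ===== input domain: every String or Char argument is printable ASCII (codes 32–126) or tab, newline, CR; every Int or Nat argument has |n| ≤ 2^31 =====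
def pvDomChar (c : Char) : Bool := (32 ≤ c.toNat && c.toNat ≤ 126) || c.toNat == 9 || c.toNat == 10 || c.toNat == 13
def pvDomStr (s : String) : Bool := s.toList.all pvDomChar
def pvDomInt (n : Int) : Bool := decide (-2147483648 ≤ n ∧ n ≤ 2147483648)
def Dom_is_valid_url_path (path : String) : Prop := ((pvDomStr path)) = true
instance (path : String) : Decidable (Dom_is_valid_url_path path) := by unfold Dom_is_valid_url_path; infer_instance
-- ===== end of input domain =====

-- B replaces A's two-phase check (full invalid-char scan, then split("/") and a loop
-- over segments[1:]) by a single pass over the characters with a seen-slash flag.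


-- ===== PORT A =====
-- invalid_chars = set(' <>"{}|\^`')  (both Pythons build this same set literal)
def pvInvalidChars : PySem.Set Char := PySem.Set.ofList " <>\"{}|\\^`".toList

-- A's loop 'for segment in segments[1:]: …'
def pvSegLoop : List (List Char) → Bool
  | [] => true
  | seg :: rest =>
      if !seg.isEmpty && ([['?'], ['#']].any (fun sub => PySem.Chars.isIn sub seg)) then false
      else pvSegLoop rest

def is_valid_url_path (path : String) : Bool :=
  if path.toList = [] then true
  else if path.toList.any (fun ch => PySem.Set.contains pvInvalidChars ch) then false
  else pvSegLoop (PySem.Chars.splitOn path.toList ['/']).tail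

-- ===== PORT B =====
-- B's single 'for ch in path:' loop carrying the seen_slash flag
def pvAltLoop (seen : Bool) : List Char → Bool
  | [] => true
  | c :: rest =>
      if PySem.Set.contains pvInvalidChars c then false
      else if c == '/' then pvAltLoop true rest
      else if seen && (c == '?' || c == '#') then false
      else pvAltLoop seen rest

def is_valid_url_path_alt (path : String) : Bool :=
  pvAltLoop false path.toList

-- ===== PRECONDITION & SPEC =====
def Spec_is_valid_url_path (path : String) (out : Bool) : Prop := out = is_valid_url_path_alt path
instance (path : String) (out : Bool) : Decidable (Spec_is_valid_url_path path out) := by unfold Spec_is_valid_url_path; infer_instance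

-- ===== CLAIM (what is proved, stated in full; the proofs are below) =====
def Claim_equal_is_valid_url_path : Prop := ∀ (path : String), Dom_is_valid_url_path path → Spec_is_valid_url_path path (is_valid_url_path path)

-- ===== LEMMAS AND PROOFS =====

-- the '?'/'#' test, shared by the proofs below
def pvQH (c : Char) : Bool := c == '?' || c == '#'

theorem pv_isIn_singleton (c : Char) (s : List Char) :
    PySem.Chars.isIn [c] s = s.contains c := by
  by_cases h : c ∈ s
  · have hi : [c] <:+: s := by
      obtain ⟨u, v, rfl⟩ := List.mem_iff_append.mp h
      exact ⟨u, v, by simp⟩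
    simp [(PySem.Chars.isIn_iff_infix _ _).mpr hi, h]
  · have hi : ¬ ([c] <:+: s) := fun hi => h (hi.mem (List.mem_singleton_self c))
    simp [(PySem.Chars.isIn_eq_false_iff _ _).mpr hi, h]

theorem pv_beq_decide (x y : Char) : (x == y) = decide (x = y) := by
  by_cases h : x = y <;> simp [h]

theorem pv_any_qh (u : List Char) : u.any pvQH = (u.contains '?' || u.contains '#') := by
  induction u with
  | nil => simp
  | cons b bs ih => simp [pvQH, ih, Bool.or_assoc, Bool.or_left_comm, eq_comm, pv_beq_decide]

theorem pv_segLoop_flatten (s : List (List Char)) :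
    pvSegLoop s = !(s.flatten.any pvQH) := by
  induction s with
  | nil => simp [pvSegLoop]
  | cons seg rest ih =>
      have hseg : (!seg.isEmpty && ([['?'], ['#']].any (fun sub => PySem.Chars.isIn sub seg)))
          = seg.any pvQH := by
        cases seg with
        | nil => simp
        | cons a t => simp [pv_isIn_singleton, pv_any_qh, pvQH, eq_comm, Bool.or_assoc, Bool.or_left_comm, pv_beq_decide]
      rw [pvSegLoop, hseg, ih]
      by_cases h : seg.any pvQH = true <;> simp [h, List.any_append]

theorem pv_flatten_splitOnP (c : Char) (l : List Char) :
    (l.splitOnP (· == c)).flatten = l.filter (fun x => !(x == c)) := by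
  induction l with
  | nil => simp [List.splitOnP_nil]
  | cons a rest ih =>
      rw [List.splitOnP_cons]
      by_cases hc : a = c
      · subst hc; simp [ih]
      · rw [if_neg (by simp [hc])]
        cases h : rest.splitOnP (· == c) with
        | nil => exact absurd h (List.splitOnP_ne_nil _ _)
        | cons s ss =>
            have ih' := ih
            rw [h] at ih'
            simp only [List.modifyHead, List.flatten_cons, List.filter_cons]
            rw [if_pos (by simp [hc])]
            rw [← ih']
            simp

theorem pv_altLoop_true (l : List Char) :
    pvAltLoop true l = l.all (fun c => !(PySem.Set.contains pvInvalidChars c) && !(pvQH c)) := by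
  induction l with
  | nil => simp [pvAltLoop]
  | cons a rest ih =>
      by_cases h1 : a ∈ pvInvalidChars
      · simp [pvAltLoop, PySem.Set.contains, h1]
      · by_cases h2 : a = '/'
        · subst h2
          simp [pvAltLoop, PySem.Set.contains, h1, ih, pvQH]
        · by_cases h3 : pvQH a = true
          · simp [pvAltLoop, PySem.Set.contains, h1, h2, pvQH] at h3 ⊢
            rcases h3 with h|h <;> simp [h]
          · simp [pvAltLoop, PySem.Set.contains, h1, h2, pvQH, ih] at h3 ⊢
            simp [h3.1, h3.2]

theorem pv_splitOn_go (c : Char) :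
    ∀ (l : List Char) (fuel : Nat) (cur : List Char) (acc : List (List Char)),
      l.length ≤ fuel →
      PySem.Chars.splitOn.go [c] fuel l cur acc
        = acc.reverse ++ (l.splitOnP (· == c)).modifyHead (fun s => cur.reverse ++ s) := by
  intro l
  induction l with
  | nil =>
      intro fuel cur acc _
      cases fuel <;> simp [PySem.Chars.splitOn.go, List.splitOnP_nil]
  | cons a rest ih =>
      intro fuel cur acc hf
      cases fuel with
      | zero => simp at hf
      | succ f =>
          by_cases hc : a = c
          · subst hc
            have hpre : List.isPrefixOf [a] (a :: rest) = true := by simp [List.isPrefixOf]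
            have hstep : PySem.Chars.splitOn.go [a] (f+1) (a :: rest) cur acc
                  = PySem.Chars.splitOn.go [a] f rest [] (cur.reverse :: acc) := by
              simp [PySem.Chars.splitOn.go, hpre]
            rw [hstep, ih f [] (cur.reverse :: acc) (by simpa using Nat.le_of_succ_le_succ hf)]
            rw [List.splitOnP_cons]
            simp only [beq_self_eq_true]
            cases h : rest.splitOnP (· == a) with
            | nil => exact absurd h (List.splitOnP_ne_nil _ _)
            | cons s ss => simp
          · have hpre : List.isPrefixOf [c] (a :: rest) = false := by
              simp [List.isPrefixOf]
              exact fun h => hc h.symm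
            have hstep : PySem.Chars.splitOn.go [c] (f+1) (a :: rest) cur acc
                  = PySem.Chars.splitOn.go [c] f rest (a :: cur) acc := by
              simp [PySem.Chars.splitOn.go, hpre]
            rw [hstep, ih f (a :: cur) acc (Nat.le_of_succ_le_succ hf)]
            rw [List.splitOnP_cons]
            rw [if_neg (by simp [hc])]
            cases h : rest.splitOnP (· == c) with
            | nil => exact absurd h (List.splitOnP_ne_nil _ _)
            | cons s ss => simp

theorem pv_splitOn_eq (c : Char) (l : List Char) :
    PySem.Chars.splitOn l [c] = l.splitOnP (· == c) := by
  rw [show PySem.Chars.splitOn l [c] = PySem.Chars.splitOn.go [c] (l.length + 1) l [] [] from rfl]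
  rw [pv_splitOn_go c l (l.length + 1) [] [] (Nat.le_succ _)]
  cases h : l.splitOnP (· == c) with
  | nil => exact absurd h (List.splitOnP_ne_nil _ _)
  | cons s ss => simp

theorem pv_all_split (r : List Char) :
    (if r.any (fun ch => PySem.Set.contains pvInvalidChars ch) then false
     else !(r.any (fun c => !(c == '/') && pvQH c)))
      = r.all (fun c => !(PySem.Set.contains pvInvalidChars c) && !(pvQH c)) := by
  induction r with
  | nil => simp
  | cons a rest ih =>
      by_cases h1 : a ∈ pvInvalidChars
      · simp [PySem.Set.contains, h1]
      · by_cases h3 : pvQH a = true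
        · have ha : ¬ a = '/' := by
            simp [pvQH] at h3
            rcases h3 with h|h <;> simp [h]
          simp [PySem.Set.contains, h1, h3, ha]
        · have h3' : pvQH a = false := by simpa using h3
          simp only [List.any_cons, List.all_cons]
          rw [show PySem.Set.contains pvInvalidChars a = false from by
            simp [PySem.Set.contains, h1], h3']
          rw [← ih]
          by_cases h : rest.any (fun ch => PySem.Set.contains pvInvalidChars ch) = true
          · simp
          · simp only [Bool.not_eq_true] at h
            simp

theorem pv_main (l : List Char) :
    (if l.any (fun ch => PySem.Set.contains pvInvalidChars ch) then false
     else pvSegLoop ((l.splitOnP (· == '/')).tail))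
      = pvAltLoop false l := by
  induction l with
  | nil => simp [List.splitOnP_nil, pvSegLoop, pvAltLoop]
  | cons a rest ih =>
      by_cases hinv : a ∈ pvInvalidChars
      · simp [pvAltLoop, PySem.Set.contains, hinv]
      · by_cases hsl : a = '/'
        · subst hsl
          have hslash : ('/' : Char) ∉ pvInvalidChars := by decide
          rw [List.splitOnP_cons]
          rw [if_pos (by decide : (('/' : Char) == '/') = true)]
          rw [List.tail_cons]
          rw [pvAltLoop]
          rw [pv_altLoop_true, pv_segLoop_flatten, pv_flatten_splitOnP, List.any_filter]
          rw [← pv_all_split]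
          simp [PySem.Set.contains, hslash, pvQH]
        · rw [List.splitOnP_cons]
          rw [show (a == '/') = false from by simp [hsl]]
          rw [if_neg Bool.false_ne_true]
          have htail : ∀ s : List (List Char), s ≠ [] → (s.modifyHead (List.cons a)).tail = s.tail := by
            intro s hs
            cases s with
            | nil => exact absurd rfl hs
            | cons x xs => simp [List.modifyHead]
          rw [htail _ (List.splitOnP_ne_nil _ _)]
          rw [pvAltLoop]
          rw [← ih]
          by_cases h : rest.any (fun ch => PySem.Set.contains pvInvalidChars ch) = true
          · simp [PySem.Set.contains, hinv, hsl]
          · simp only [Bool.not_eq_true] at h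
            simp [PySem.Set.contains, hinv, hsl]

-- ===== VERDICT (by name: the statement is the Claim_ definition above) =====
theorem is_valid_url_path_spec : Claim_equal_is_valid_url_path := by
  intro path _
  unfold Spec_is_valid_url_path is_valid_url_path is_valid_url_path_alt
  cases h : path.toList with
  | nil => simp [pvAltLoop]
  | cons a rest =>
      rw [if_neg (by simp)]
      rw [pv_splitOn_eq]
      rw [pv_main]
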